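-- pv_equiv track=rewrite | github.com/jmfcc/ProyectoFinal_LFP | generaGraf.py | sonRaiz
-- ===== SOURCE A (Python) =====
-- def sonRaiz(nodos, idSalida, idLlegada):
--     lvlSalida = 0
--     lvlLlegada = 0
--     for n in nodos:
--         if n[1] == idSalida:
--             lvlSalida = n[2]
--         if n[1] == idLlegada:
--             lvlLlegada = n[2]
--     if lvlSalida == lvlLlegada:
--         if lvlSalida == 1:
--             return True
--         else:
--             return False
--     else:
--         return False
-- ===== SOURCE B (Python) =====
-- def sonRaiz(nodos, idSalida, idLlegada):
--     def nivel(nid):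
--         # last occurrence wins == first match scanning from the back; early exit
--         for n in reversed(nodos):
--             if n[1] == nid:
--                 return n[2]
--         return 0
--     return nivel(idSalida) == 1 and nivel(idLlegada) == 1
-- ===== Notes on version B (the rewrite author's own statement) =====
-- stated objective: alternative
-- what changed: Instead of one forward pass carrying two overwrite-accumulators and a nested if/else return chain, B scans the list BACKWARD with early exit (first match from the back = last occurrence), via a helper called once per id, and returns the conjunction directly; short-circuit 'and' can skip the second scan entirely.
import Mathlib
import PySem

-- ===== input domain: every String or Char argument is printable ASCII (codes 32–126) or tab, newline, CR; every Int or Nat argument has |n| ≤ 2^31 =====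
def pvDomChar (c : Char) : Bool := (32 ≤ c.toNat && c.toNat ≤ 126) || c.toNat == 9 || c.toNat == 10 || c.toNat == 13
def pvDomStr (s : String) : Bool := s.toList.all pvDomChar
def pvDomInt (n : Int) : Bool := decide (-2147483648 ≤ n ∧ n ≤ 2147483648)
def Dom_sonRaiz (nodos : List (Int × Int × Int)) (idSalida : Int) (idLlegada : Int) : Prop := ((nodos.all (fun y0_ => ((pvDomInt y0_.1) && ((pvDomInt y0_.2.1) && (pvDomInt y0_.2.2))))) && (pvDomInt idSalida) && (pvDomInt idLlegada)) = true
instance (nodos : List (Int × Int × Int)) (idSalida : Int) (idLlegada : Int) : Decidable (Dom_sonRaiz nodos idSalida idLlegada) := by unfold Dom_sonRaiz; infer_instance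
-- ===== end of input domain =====

-- B replaces A's forward two-accumulator scan and nested if/else chain with a backward
-- early-exit scan per id (first match from the back = last occurrence); alternative decomposition, same cost.


-- ===== PORT A =====
-- forward loop over nodos carrying the pair (lvlSalida, lvlLlegada), the two updates in order
def sonRaiz (nodos : List (Int × Int × Int)) (idSalida : Int) (idLlegada : Int) : Bool :=
  let p := nodos.foldl
    (fun (p : Int × Int) n =>
      let p1 := if n.2.1 == idSalida then (n.2.2, p.2) else p
      if n.2.1 == idLlegada then (p1.1, n.2.2) else p1)
    (0, 0)
  if p.1 == p.2 then
    if p.1 == 1 then true else false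
  else false

-- ===== PORT B =====
-- nivel(nid): scan reversed(nodos), return n[2] at the first match, 0 if none
def nivelAux (nid : Int) : List (Int × Int × Int) → Int
  | [] => 0
  | n :: t => if n.2.1 == nid then n.2.2 else nivelAux nid t

def sonRaiz_alt (nodos : List (Int × Int × Int)) (idSalida : Int) (idLlegada : Int) : Bool :=
  nivelAux idSalida nodos.reverse == 1 && nivelAux idLlegada nodos.reverse == 1

-- ===== PRECONDITION & SPEC =====
def Spec_sonRaiz (nodos : List (Int × Int × Int)) (idSalida : Int) (idLlegada : Int) (out : Bool) : Prop := out = sonRaiz_alt nodos idSalida idLlegada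
instance (nodos : List (Int × Int × Int)) (idSalida : Int) (idLlegada : Int) (out : Bool) : Decidable (Spec_sonRaiz nodos idSalida idLlegada out) := by unfold Spec_sonRaiz; infer_instance

-- ===== CLAIM (what is proved, stated in full; the proofs are below) =====
def Claim_equal_sonRaiz : Prop := ∀ (nodos : List (Int × Int × Int)) (idSalida : Int) (idLlegada : Int), Dom_sonRaiz nodos idSalida idLlegada → Spec_sonRaiz nodos idSalida idLlegada (sonRaiz nodos idSalida idLlegada)

-- ===== LEMMAS AND PROOFS =====

-- proof helper: nivelAux generalized with an explicit default
def nivelD (nid d : Int) : List (Int × Int × Int) → Int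
  | [] => d
  | n :: t => if n.2.1 == nid then n.2.2 else nivelD nid d t

theorem nivelAux_eq_nivelD (nid : Int) (l : List (Int × Int × Int)) :
    nivelAux nid l = nivelD nid 0 l := by
  induction l with
  | nil => rfl
  | cons a t ih => simp [nivelAux, nivelD, ih]

theorem nivelD_append (nid d : Int) (xs ys : List (Int × Int × Int)) :
    nivelD nid d (xs ++ ys) = nivelD nid (nivelD nid d ys) xs := by
  induction xs with
  | nil => rfl
  | cons a t ih => simp [nivelD, ih]

-- A's scalar forward overwrite fold = B's backward first-match scan
theorem foldl_eq_nivelD (k : Int) (l : List (Int × Int × Int)) (v : Int) :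
    l.foldl (fun v n => if n.2.1 == k then n.2.2 else v) v = nivelD k v l.reverse := by
  induction l generalizing v with
  | nil => rfl
  | cons a t ih =>
    simp only [List.foldl_cons, List.reverse_cons, nivelD_append, ih]
    rfl

-- A's pair fold is the pair of the two independent scalar folds
theorem pair_fold (l : List (Int × Int × Int)) (s t : Int) (p : Int × Int) :
    l.foldl (fun (p : Int × Int) n =>
        let p1 := if n.2.1 == s then (n.2.2, p.2) else p
        if n.2.1 == t then (p1.1, n.2.2) else p1) p
      = (l.foldl (fun v n => if n.2.1 == s then n.2.2 else v) p.1,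
         l.foldl (fun v n => if n.2.1 == t then n.2.2 else v) p.2) := by
  induction l generalizing p with
  | nil => rfl
  | cons n tl ih =>
    simp only [List.foldl_cons, ih]
    split_ifs <;> simp_all

theorem pv_final_eq (a b : Int) :
    (if a == b then (if a == 1 then true else false) else false) = ((a == 1) && (b == 1)) := by
  by_cases h1 : a = 1 <;> by_cases h2 : b = 1
  · simp [h1, h2]
  · simp [h1, h2, Ne.symm h2]
  · simp [h1, h2]
  · simp [h1, h2]

-- ===== VERDICT (by name: the statement is the Claim_ definition above) =====
theorem sonRaiz_spec : Claim_equal_sonRaiz := by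
  intro nodos s t _
  show sonRaiz nodos s t = sonRaiz_alt nodos s t
  unfold sonRaiz sonRaiz_alt
  simp only [pair_fold, nivelAux_eq_nivelD, ← foldl_eq_nivelD]
  exact pv_final_eq _ _
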